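-- pv_equiv track=rewrite | github.com/epolyach/Dynamic_GraphTransformer_RL | research/benchmark_exact/advanced_solver.py | _split_route_by_depot
-- ===== SOURCE A (Python) =====
-- from typing import Dict, List, Tuple, Optional, Any
--
-- def _split_route_by_depot(route: List[int]) -> List[List[int]]:
--     """Split a single route into vehicle routes at depot visits"""
--     vehicle_routes = []
--     current_route = []
--
--     for node in route:
--         current_route.append(node)
--         if node == 0 and len(current_route) > 1:
--             vehicle_routes.append(current_route[:])
--             current_route = [0]
--
--     return vehicle_routes
-- ===== SOURCE B (Python) =====
-- def _split_route_by_depot(route):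
--     """Split a single route into vehicle routes at depot visits."""
--     bounds = [i for i, x in enumerate(route) if x == 0 and i > 0]
--     result = []
--     prev = 0
--     for b in bounds:
--         result.append(route[prev:b + 1])
--         prev = b
--     return result
-- ===== Notes on version B (the rewrite author's own statement) =====
-- stated objective: alternative
-- what changed: Replaces the streaming accumulate-and-reset loop over nodes with an index pass collecting depot-boundary positions followed by a slicing pass that cuts the route at those boundaries (sharing the boundary depot between consecutive subroutes).
import Mathlib
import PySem

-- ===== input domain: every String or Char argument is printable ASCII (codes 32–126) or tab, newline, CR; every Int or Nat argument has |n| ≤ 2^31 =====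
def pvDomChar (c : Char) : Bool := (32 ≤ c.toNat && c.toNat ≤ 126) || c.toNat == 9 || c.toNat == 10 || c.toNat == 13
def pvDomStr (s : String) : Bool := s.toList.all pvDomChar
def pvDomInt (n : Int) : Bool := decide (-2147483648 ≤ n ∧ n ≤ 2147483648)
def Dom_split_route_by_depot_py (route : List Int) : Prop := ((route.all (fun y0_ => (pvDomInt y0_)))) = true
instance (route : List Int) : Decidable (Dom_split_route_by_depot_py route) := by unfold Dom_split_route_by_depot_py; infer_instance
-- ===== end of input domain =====

-- B replaces A's streaming accumulate-and-reset loop with a two-pass decomposition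
-- (collect depot-boundary indices, then slice between them); same cost, alternative structure.


-- ===== PORT A =====
-- one iteration of A's for-loop: append node, emit and reset at a non-leading depot
def pvStepA (st : List (List Int) × List Int) (node : Int) : List (List Int) × List Int :=
  let cur := st.2 ++ [node]
  if node = 0 ∧ cur.length > 1 then (st.1 ++ [cur], [0]) else (st.1, cur)

def split_route_by_depot_py (route : List Int) : List (List Int) :=
  (route.foldl pvStepA ([], [])).1

-- ===== PORT B =====
-- one iteration of B's slicing loop: append route[prev:b+1], move prev to b
def pvStepB (route : List Int) (st : List (List Int) × Int) (b : Int) : List (List Int) × Int :=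
  (st.1 ++ [PySem.List.slice route (some st.2) (some (b + 1))], b)

def split_route_by_depot_py_alt (route : List Int) : List (List Int) :=
  let bounds := ((PySem.List.enumerate route).filter (fun p => p.2 == 0 && decide (0 < p.1))).map Prod.fst
  (bounds.foldl (pvStepB route) ([], 0)).1

-- ===== PRECONDITION & SPEC =====
def Spec_split_route_by_depot_py (route : List Int) (out : List (List Int)) : Prop := out = split_route_by_depot_py_alt route
instance (route : List Int) (out : List (List Int)) : Decidable (Spec_split_route_by_depot_py route out) := by unfold Spec_split_route_by_depot_py; infer_instance

-- ===== CLAIM (what is proved, stated in full; the proofs are below) =====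
def Claim_equal_split_route_by_depot_py : Prop := ∀ (route : List Int), Dom_split_route_by_depot_py route → Spec_split_route_by_depot_py route (split_route_by_depot_py route)

-- ===== LEMMAS AND PROOFS =====

-- the boundary indices of a suffix whose first element has index s
def pvBoundsAux : List Int → Int → List Int
  | [], _ => []
  | x :: xs, s => if x = 0 ∧ 0 < s then s :: pvBoundsAux xs (s + 1) else pvBoundsAux xs (s + 1)

lemma pvBounds_eq (xs : List Int) : ∀ (s : Int),
    ((PySem.List.enumerate xs s).filter (fun p => p.2 == 0 && decide (0 < p.1))).map Prod.fst
      = pvBoundsAux xs s := by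
  induction xs with
  | nil => intro s; simp [PySem.List.enumerate_nil, pvBoundsAux]
  | cons x xs ih =>
    intro s
    rw [PySem.List.enumerate_cons]
    by_cases h : x = 0 ∧ 0 < s
    · simp [pvBoundsAux, h.1, h.2, ih]
    · simp only [List.filter_cons, Bool.and_eq_true, beq_iff_eq, decide_eq_true_eq]
      rw [if_neg h]
      simp only [pvBoundsAux]
      rw [if_neg h]
      exact ih (s + 1)

-- main invariant: running A's loop over the suffix route.drop i with current segment
-- route[prev:i] produces the same routes as B's slicing loop over the boundaries ≥ i.
lemma pvMain (route : List Int) : ∀ (xs : List Int) (i prev : Nat) (acc : List (List Int)),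
    route.drop i = xs → prev ≤ i → (prev < i ∨ (prev = 0 ∧ i = 0)) →
    (xs.foldl pvStepA (acc, (route.drop prev).take (i - prev))).1
      = ((pvBoundsAux xs (i : Int)).foldl (pvStepB route) (acc, (prev : Int))).1 := by
  intro xs
  induction xs with
  | nil => intro i prev acc _ _ _; simp [pvBoundsAux]
  | cons x rest ih =>
    intro i prev acc hdrop hle hinv
    have hilen : i < route.length := by
      by_contra h
      rw [List.drop_eq_nil_of_le (by omega)] at hdrop
      exact (List.cons_ne_nil x rest) hdrop.symm
    have hrest : route.drop (i + 1) = rest := by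
      have := congrArg List.tail hdrop
      simpa [List.tail_drop] using this
    have hx : route[i] = x := by
      have : route.drop i = x :: rest := hdrop
      have h1 : (route.drop i).head? = some x := by rw [this]; rfl
      rw [List.head?_drop] at h1
      simpa [List.getElem?_eq_getElem hilen] using h1
    have hcurlen : ((route.drop prev).take (i - prev)).length = i - prev := by
      simp [List.length_take, List.length_drop]; omega
    have hext : (route.drop prev).take (i - prev) ++ [x]
        = (route.drop prev).take (i + 1 - prev) := by
      have h2 : i + 1 - prev = (i - prev) + 1 := by omega
      rw [h2, List.take_add_one]
      have h3 : (route.drop prev)[i - prev]? = some route[i] := by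
        rw [List.getElem?_drop]
        have : prev + (i - prev) = i := by omega
        rw [this, List.getElem?_eq_getElem hilen]
      rw [h3, hx]
      rfl
    simp only [List.foldl_cons]
    by_cases hc : x = 0 ∧ 0 < i
    · -- boundary: A emits and resets, B has i as a bound
      have hpi : prev < i := by rcases hinv with h | h; exact h; omega
      have hlen2 : ((route.drop prev).take (i + 1 - prev)).length > 1 := by
        rw [← hext, List.length_append, hcurlen]
        simp only [List.length_singleton]
        omega
      have hA : pvStepA (acc, (route.drop prev).take (i - prev)) x
          = (acc ++ [(route.drop prev).take (i + 1 - prev)], [0]) := by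
        simp only [pvStepA, hext]
        rw [if_pos ⟨hc.1, hlen2⟩]
      have hbnd : pvBoundsAux (x :: rest) (i : Int)
          = (i : Int) :: pvBoundsAux rest ((i : Int) + 1) := by
        simp only [pvBoundsAux]
        rw [if_pos ⟨hc.1, by exact_mod_cast hc.2⟩]
      rw [hA, hbnd]
      simp only [List.foldl_cons]
      have hB : pvStepB route (acc, (prev : Int)) (i : Int)
          = (acc ++ [(route.drop prev).take (i + 1 - prev)], (i : Int)) := by
        simp only [pvStepB]
        have : (i : Int) + 1 = ((i + 1 : Nat) : Int) := by push_cast; ring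
        rw [this, PySem.List.slice_natCast]
      rw [hB]
      have hseg : [(0 : Int)] = (route.drop i).take (i + 1 - i) := by
        have : i + 1 - i = 1 := by omega
        rw [this, hdrop]
        simp [hc.1]
      have hcast : ((i : Int) + 1) = ((i + 1 : Nat) : Int) := by push_cast; ring
      rw [hseg, hcast]
      exact ih (i + 1) i (acc ++ [(route.drop prev).take (i + 1 - prev)]) hrest (by omega) (by omega)
    · -- not a boundary: A just extends the current segment, B skips the index
      have hA : pvStepA (acc, (route.drop prev).take (i - prev)) x
          = (acc, (route.drop prev).take (i + 1 - prev)) := by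
        simp only [pvStepA, hext]
        rw [if_neg]
        intro ⟨h1, h2⟩
        rw [← hext, List.length_append, hcurlen] at h2
        simp only [List.length_singleton] at h2
        rcases hinv with h | h
        · exact hc ⟨h1, by omega⟩
        · omega
      have hbnd : pvBoundsAux (x :: rest) (i : Int)
          = pvBoundsAux rest ((i : Int) + 1) := by
        simp only [pvBoundsAux]
        rw [if_neg]
        intro ⟨h1, h2⟩
        exact hc ⟨h1, by exact_mod_cast h2⟩
      rw [hA, hbnd]
      have hcast : ((i : Int) + 1) = ((i + 1 : Nat) : Int) := by push_cast; ring
      rw [hcast]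
      exact ih (i + 1) prev acc hrest (by omega) (by omega)

-- ===== VERDICT (by name: the statement is the Claim_ definition above) =====
theorem split_route_by_depot_py_spec : Claim_equal_split_route_by_depot_py := by
  intro route _
  unfold Spec_split_route_by_depot_py split_route_by_depot_py split_route_by_depot_py_alt
  rw [pvBounds_eq]
  have := pvMain route route 0 0 [] (by simp) (by omega) (Or.inr ⟨rfl, rfl⟩)
  simpa using this
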